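-- pv_equiv track=rewrite | github.com/Nikkuniku/AtcoderProgramming | ABC/ABC100~ABC199/ABC155/d2.py | f
-- ===== SOURCE A (Python) =====
-- def f(A, x, k):
--     from bisect import bisect_right, bisect_left
--
--     cnt = 0
--     for i, v in enumerate(A):
--         if i == 0:
--             continue
--         if v == 0:
--             if x >= 0:
--                 cnt += i
--         elif v > 0:
--             p = x // v
--             j = bisect_right(A, p)
--             cnt += min(i, j)
--         elif v < 0:
--             p = -(-x // v)
--             j = bisect_left(A, p)
--             cnt += max(i - j, 0)
--     return cnt >= k
-- ===== SOURCE B (Python) =====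
-- def f(A, x, k):
--     # Offline batched binary search: collect one threshold query per non-zero
--     # element, then resolve ALL queries in a single divide-and-conquer pass over
--     # the implicit binary-search tree, summing contributions at the leaves.
--     base = 0
--     qs = []  # (key, is_left_bisect, position)
--     for i in range(1, len(A)):
--         v = A[i]
--         if v == 0:
--             if x >= 0:
--                 base += i
--         elif v > 0:
--             qs.append((x // v, False, i))
--         else:
--             qs.append((-(-x // v), True, i))
--     return base + _batch(A, qs, 0, len(A)) >= k
--
--
-- def _batch(A, qs, lo, hi):
--     if not qs:
--         return 0
--     if lo >= hi:
--         return sum(max(i - lo, 0) if neg else min(i, lo) for (key, neg, i) in qs)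
--     mid = (lo + hi) // 2
--     a = A[mid]
--     left = [q for q in qs if q[0] < a or (q[1] and q[0] == a)]
--     right = [q for q in qs if not (q[0] < a or (q[1] and q[0] == a))]
--     return _batch(A, left, lo, mid) + _batch(A, right, mid + 1, hi)
-- ===== Notes on version B (the rewrite author's own statement) =====
-- stated objective: alternative
-- what changed: B replaces A's per-element online bisect calls by an offline batched binary search: it collects one threshold query per non-zero element and resolves all of them in a single divide-and-conquer pass over the implicit binary-search tree, summing the contributions at the leaves.
import Mathlib
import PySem

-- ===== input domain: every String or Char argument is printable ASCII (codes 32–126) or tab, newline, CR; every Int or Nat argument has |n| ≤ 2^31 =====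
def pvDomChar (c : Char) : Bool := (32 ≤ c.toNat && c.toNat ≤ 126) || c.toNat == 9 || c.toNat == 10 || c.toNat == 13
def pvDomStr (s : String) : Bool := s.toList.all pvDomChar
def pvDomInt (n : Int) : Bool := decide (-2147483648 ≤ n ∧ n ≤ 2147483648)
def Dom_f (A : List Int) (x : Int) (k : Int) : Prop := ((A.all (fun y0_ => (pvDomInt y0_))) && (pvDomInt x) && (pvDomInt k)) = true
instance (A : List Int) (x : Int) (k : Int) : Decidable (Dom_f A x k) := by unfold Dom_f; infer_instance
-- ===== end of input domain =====

-- B resolves all bisect queries at once by an offline divide-and-conquer pass over the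
-- implicit binary-search tree instead of A's per-element online bisect calls (objective:
-- alternative; same asymptotic cost).

-- ===== PORT A =====
def f (A : List Int) (x : Int) (k : Int) : Bool :=
  let cnt : Int := (PySem.List.enumerate A).foldl (fun cnt p =>
    let i := p.1
    let v := p.2
    if i = 0 then cnt
    else if v = 0 then (if x ≥ 0 then cnt + i else cnt)
    else if v > 0 then
      let p' := PySem.Int.floordiv x v
      let j : Int := PySem.List.bisectRight A p'
      cnt + min i j
    else if v < 0 then
      let p' := -(PySem.Int.floordiv (-x) v)
      let j : Int := PySem.List.bisectLeft A p'
      cnt + max (i - j) 0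
    else cnt) 0
  decide (cnt ≥ k)

-- ===== PORT B =====
-- the branch test `q[0] < a or (q[1] and q[0] == a)` of _batch, named once
def pvGoesLeft (a : Int) (q : Int × Bool × Int) : Bool :=
  q.1 < a || (q.2.1 && q.1 == a)

-- _batch: lo/hi always satisfy 0 ≤ lo ≤ hi ≤ len A in B, so Python's A[mid] is in
-- range; it is ported as List.getD (exact on every reachable call).
def pvBatch (A : List Int) (qs : List (Int × Bool × Int)) (lo hi : Nat) : Int :=
  if qs = [] then 0
  else if lo ≥ hi then
    (qs.map (fun q => if q.2.1 then max (q.2.2 - (lo : Int)) 0 else min q.2.2 (lo : Int))).sum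
  else
    pvBatch A (qs.filter (pvGoesLeft (A.getD ((lo + hi) / 2) 0))) lo ((lo + hi) / 2)
      + pvBatch A (qs.filter (fun q => !pvGoesLeft (A.getD ((lo + hi) / 2) 0) q)) ((lo + hi) / 2 + 1) hi
termination_by hi - lo
decreasing_by all_goals omega

-- the loop body of B's first pass (i ranges over 1..len A - 1, so A[i] is in range;
-- ported as pyGetD, exact on every reachable call)
def pvStep (A : List Int) (x : Int) (st : Int × List (Int × Bool × Int)) (i : Int) :
    Int × List (Int × Bool × Int) :=
  let v := PySem.List.pyGetD A i 0
  if v = 0 then (if x ≥ 0 then (st.1 + i, st.2) else st)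
  else if v > 0 then (st.1, st.2 ++ [(PySem.Int.floordiv x v, false, i)])
  else (st.1, st.2 ++ [(-(PySem.Int.floordiv (-x) v), true, i)])

def f_alt (A : List Int) (x : Int) (k : Int) : Bool :=
  let st := (PySem.List.pyRange 1 (A.length : Int) 1).foldl (pvStep A x) (0, [])
  decide (st.1 + pvBatch A st.2 0 A.length ≥ k)

-- ===== PRECONDITION & SPEC =====
def Spec_f (A : List Int) (x : Int) (k : Int) (out : Bool) : Prop := out = f_alt A x k
instance (A : List Int) (x : Int) (k : Int) (out : Bool) : Decidable (Spec_f A x k out) := by unfold Spec_f; infer_instance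

-- ===== CLAIM (what is proved, stated in full; the proofs are below) =====
def Claim_equal_f : Prop := ∀ (A : List Int) (x : Int) (k : Int), Dom_f A x k → Spec_f A x k (f A x k)

-- ===== LEMMAS AND PROOFS =====

-- contribution of one (index, value) pair — the common shape of both sums
def gA (A : List Int) (x : Int) (p : Int × Int) : Int :=
  if p.2 = 0 then (if x ≥ 0 then p.1 else 0)
  else if p.2 > 0 then min p.1 ((PySem.List.bisectRight A (PySem.Int.floordiv x p.2) : Nat) : Int)
  else if p.2 < 0 then max (p.1 - ((PySem.List.bisectLeft A (-(PySem.Int.floordiv (-x) p.2)) : Nat) : Int)) 0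
  else 0

-- A's loop is the sum of gA over enumerate, with 0 for index 0
lemma fold_A (A : List Int) (x : Int) (l : List (Int × Int)) (a : Int) :
    l.foldl (fun cnt p =>
      let i := p.1
      let v := p.2
      if i = 0 then cnt
      else if v = 0 then (if x ≥ 0 then cnt + i else cnt)
      else if v > 0 then
        let p' := PySem.Int.floordiv x v
        let j : Int := PySem.List.bisectRight A p'
        cnt + min i j
      else if v < 0 then
        let p' := -(PySem.Int.floordiv (-x) v)
        let j : Int := PySem.List.bisectLeft A p'
        cnt + max (i - j) 0
      else cnt) a
    = a + (l.map (fun p => if p.1 = 0 then 0 else gA A x p)).sum := by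
  have : (fun (cnt : Int) (p : Int × Int) =>
      let i := p.1
      let v := p.2
      if i = 0 then cnt
      else if v = 0 then (if x ≥ 0 then cnt + i else cnt)
      else if v > 0 then
        let p' := PySem.Int.floordiv x v
        let j : Int := PySem.List.bisectRight A p'
        cnt + min i j
      else if v < 0 then
        let p' := -(PySem.Int.floordiv (-x) v)
        let j : Int := PySem.List.bisectLeft A p'
        cnt + max (i - j) 0
      else cnt)
      = (fun cnt p => cnt + (if p.1 = 0 then 0 else gA A x p)) := by
    funext cnt p
    simp only [gA]
    split_ifs <;> omega
  rw [this, PySem.List.foldl_add]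

-- per-query reference: the path one query takes through B's divide and conquer
def pvSearch (A : List Int) (q : Int × Bool × Int) (lo hi : Nat) : Nat :=
  if lo < hi then
    if pvGoesLeft (A.getD ((lo + hi) / 2) 0) q then pvSearch A q lo ((lo + hi) / 2)
    else pvSearch A q ((lo + hi) / 2 + 1) hi
  else lo
termination_by hi - lo
decreasing_by all_goals omega

lemma pvSearch_pos (A : List Int) (q : Int × Bool × Int) (lo hi : Nat) (h : lo < hi) :
    pvSearch A q lo hi =
      if pvGoesLeft (A.getD ((lo + hi) / 2) 0) q then pvSearch A q lo ((lo + hi) / 2)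
      else pvSearch A q ((lo + hi) / 2 + 1) hi := by
  rw [pvSearch, if_pos h]

lemma pvSearch_base (A : List Int) (q : Int × Bool × Int) (lo hi : Nat) (h : ¬ lo < hi) :
    pvSearch A q lo hi = lo := by
  rw [pvSearch, if_neg h]

def pvContrib (q : Int × Bool × Int) (j : Nat) : Int :=
  if q.2.1 then max (q.2.2 - (j : Int)) 0 else min q.2.2 (j : Int)

lemma pvBatch_leaf (A : List Int) (qs : List (Int × Bool × Int)) (lo hi : Nat)
    (h : ¬ lo < hi) :
    pvBatch A qs lo hi = (qs.map (fun q => pvContrib q (pvSearch A q lo hi))).sum := by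
  rw [pvBatch]
  rcases eq_or_ne qs [] with rfl | hqs
  · simp
  · rw [if_neg hqs, if_pos (by omega : lo ≥ hi)]
    apply congrArg
    apply List.map_congr_left
    intro q _
    rw [pvSearch_base A q lo hi h, pvContrib]

-- the batched pass computes, for every query, exactly its own search result
lemma pvBatch_sum (A : List Int) :
    ∀ (N lo hi : Nat) (qs : List (Int × Bool × Int)), hi - lo ≤ N →
    pvBatch A qs lo hi = (qs.map (fun q => pvContrib q (pvSearch A q lo hi))).sum := by
  intro N
  induction N with
  | zero =>
    intro lo hi qs hN
    exact pvBatch_leaf A qs lo hi (by omega)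
  | succ N ih =>
    intro lo hi qs hN
    by_cases hlt : lo < hi
    · rw [pvBatch]
      rcases eq_or_ne qs [] with rfl | hqs
      · simp
      · rw [if_neg hqs, if_neg (by omega : ¬ lo ≥ hi)]
        have hb : lo ≤ (lo + hi) / 2 ∧ (lo + hi) / 2 < hi := by constructor <;> omega
        set a := A.getD ((lo + hi) / 2) 0 with ha
        rw [ih lo ((lo + hi) / 2) (qs.filter (pvGoesLeft a)) (by omega),
            ih ((lo + hi) / 2 + 1) hi (qs.filter (fun q => !pvGoesLeft a q)) (by omega)]
        rw [List.map_congr_left (l := qs.filter (pvGoesLeft a))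
              (f := fun q => pvContrib q (pvSearch A q lo ((lo + hi) / 2)))
              (g := fun q => pvContrib q (pvSearch A q lo hi))
              (fun q hq => by
                show pvContrib q (pvSearch A q lo ((lo + hi) / 2))
                    = pvContrib q (pvSearch A q lo hi)
                rw [pvSearch_pos A q lo hi hlt, ← ha,
                    if_pos (List.of_mem_filter hq)]),
            List.map_congr_left (l := qs.filter (fun q => !pvGoesLeft a q))
              (f := fun q => pvContrib q (pvSearch A q ((lo + hi) / 2 + 1) hi))
              (g := fun q => pvContrib q (pvSearch A q lo hi))
              (fun q hq => by
                show pvContrib q (pvSearch A q ((lo + hi) / 2 + 1) hi)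
                    = pvContrib q (pvSearch A q lo hi)
                have hnc : pvGoesLeft a q = false := by
                  have := List.of_mem_filter hq
                  simpa using this
                rw [pvSearch_pos A q lo hi hlt, ← ha, hnc]
                rfl)]
        have hperm := ((List.filter_append_perm (pvGoesLeft a) qs).map
          (fun q => pvContrib q (pvSearch A q lo hi))).sum_eq
        rw [List.map_append, List.sum_append] at hperm
        exact hperm
    · exact pvBatch_leaf A qs lo hi hlt

-- B's search path equals Python's bisect_right binary search
lemma pvSearch_eq_bisectRight_loop (A : List Int) (key i0 : Int) :
    ∀ (fuel lo hi : Nat), hi ≤ A.length → hi - lo ≤ fuel →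
    PySem.List.bisectRightLoop A key fuel lo hi = pvSearch A (key, false, i0) lo hi := by
  intro fuel
  induction fuel with
  | zero =>
    intro lo hi _ hN
    rw [pvSearch_base A _ lo hi (by omega)]
    simp [PySem.List.bisectRightLoop]
  | succ fuel ih =>
    intro lo hi hlen hN
    by_cases hlt : lo < hi
    · have hb : lo ≤ (lo + hi) / 2 ∧ (lo + hi) / 2 < hi := by constructor <;> omega
      have hmidlt : (lo + hi) / 2 < A.length := by omega
      have hget : A[(lo + hi) / 2]? = some (A.getD ((lo + hi) / 2) 0) := by
        rw [List.getElem?_eq_getElem hmidlt, List.getD_eq_getElem A 0 hmidlt]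
      rw [pvSearch_pos A _ lo hi hlt]
      simp only [PySem.List.bisectRightLoop, hlt, if_pos, hget]
      have hcond : pvGoesLeft (A.getD ((lo + hi) / 2) 0) (key, false, i0)
          = decide (key < A.getD ((lo + hi) / 2) 0) := by
        simp [pvGoesLeft]
      rw [hcond]
      by_cases hc : key < A.getD ((lo + hi) / 2) 0
      · rw [if_pos hc, if_pos (by simpa using hc),
            ih lo ((lo + hi) / 2) (by omega) (by omega)]
      · rw [if_neg hc, if_neg (by simpa using hc),
            ih ((lo + hi) / 2 + 1) hi (by omega) (by omega)]
    · rw [pvSearch_base A _ lo hi hlt]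
      simp [PySem.List.bisectRightLoop, hlt]

-- B's search path equals Python's bisect_left binary search
lemma pvSearch_eq_bisectLeft_loop (A : List Int) (key i0 : Int) :
    ∀ (fuel lo hi : Nat), hi ≤ A.length → hi - lo ≤ fuel →
    PySem.List.bisectLeftLoop A key fuel lo hi = pvSearch A (key, true, i0) lo hi := by
  intro fuel
  induction fuel with
  | zero =>
    intro lo hi _ hN
    rw [pvSearch_base A _ lo hi (by omega)]
    simp [PySem.List.bisectLeftLoop]
  | succ fuel ih =>
    intro lo hi hlen hN
    by_cases hlt : lo < hi
    · have hb : lo ≤ (lo + hi) / 2 ∧ (lo + hi) / 2 < hi := by constructor <;> omega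
      have hmidlt : (lo + hi) / 2 < A.length := by omega
      have hget : A[(lo + hi) / 2]? = some (A.getD ((lo + hi) / 2) 0) := by
        rw [List.getElem?_eq_getElem hmidlt, List.getD_eq_getElem A 0 hmidlt]
      rw [pvSearch_pos A _ lo hi hlt]
      simp only [PySem.List.bisectLeftLoop, hlt, if_pos, hget]
      by_cases hc : A.getD ((lo + hi) / 2) 0 < key
      · have hgl : pvGoesLeft (A.getD ((lo + hi) / 2) 0) (key, true, i0) = false := by
          simp only [pvGoesLeft, Bool.true_and, Bool.or_eq_false_iff,
            decide_eq_false_iff_not, beq_eq_false_iff_ne, ne_eq]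
          exact ⟨by omega, by omega⟩
        rw [if_pos hc, hgl, if_neg Bool.false_ne_true,
            ih ((lo + hi) / 2 + 1) hi (by omega) (by omega)]
      · have hgl : pvGoesLeft (A.getD ((lo + hi) / 2) 0) (key, true, i0) = true := by
          simp only [pvGoesLeft, Bool.true_and, Bool.or_eq_true,
            decide_eq_true_eq, beq_iff_eq]
          omega
        rw [if_neg hc, hgl, if_pos rfl,
            ih lo ((lo + hi) / 2) (by omega) (by omega)]
    · rw [pvSearch_base A _ lo hi hlt]
      simp [PySem.List.bisectLeftLoop, hlt]

lemma pvSearch_eq_bisectRight (A : List Int) (key i0 : Int) :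
    pvSearch A (key, false, i0) 0 A.length = PySem.List.bisectRight A key := by
  rw [PySem.List.bisectRight,
    pvSearch_eq_bisectRight_loop A key i0 A.length 0 A.length le_rfl (by omega)]

lemma pvSearch_eq_bisectLeft (A : List Int) (key i0 : Int) :
    pvSearch A (key, true, i0) 0 A.length = PySem.List.bisectLeft A key := by
  rw [PySem.List.bisectLeft,
    pvSearch_eq_bisectLeft_loop A key i0 A.length 0 A.length le_rfl (by omega)]

-- invariant of B's first pass: base plus the resolved contributions of the queries
lemma loop_inv (A : List Int) (x : Int) :
    ∀ (l : List Int) (b : Int) (qs : List (Int × Bool × Int)),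
    (l.foldl (pvStep A x) (b, qs)).1
      + (((l.foldl (pvStep A x) (b, qs)).2).map
          (fun q => pvContrib q (pvSearch A q 0 A.length))).sum
    = b + (qs.map (fun q => pvContrib q (pvSearch A q 0 A.length))).sum
        + (l.map (fun i => gA A x (i, PySem.List.pyGetD A i 0))).sum := by
  intro l
  induction l with
  | nil => intro b qs; simp
  | cons i l ih =>
    intro b qs
    simp only [List.foldl_cons, List.map_cons, List.sum_cons]
    set v := PySem.List.pyGetD A i 0 with hv
    by_cases h0 : v = 0
    · by_cases hx : x ≥ 0
      · rw [show pvStep A x (b, qs) i = (b + i, qs) by simp [pvStep, ← hv, h0, hx]]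
        rw [ih (b + i) qs]
        simp only [gA, h0, if_pos, hx]
        simp
        ring
      · rw [show pvStep A x (b, qs) i = (b, qs) by simp [pvStep, ← hv, h0, hx]]
        rw [ih b qs]
        simp [gA, h0, hx]
    · by_cases hp : v > 0
      · rw [show pvStep A x (b, qs) i
            = (b, qs ++ [(PySem.Int.floordiv x v, false, i)]) by simp [pvStep, ← hv, h0, hp]]
        rw [ih b (qs ++ [(PySem.Int.floordiv x v, false, i)])]
        simp only [List.map_append, List.sum_append, List.map_cons, List.map_nil,
          List.sum_cons, List.sum_nil]
        have hone : pvContrib (PySem.Int.floordiv x v, false, i)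
            (pvSearch A (PySem.Int.floordiv x v, false, i) 0 A.length)
            = gA A x (i, v) := by
          rw [pvContrib, pvSearch_eq_bisectRight]
          simp [gA, h0, hp]
        rw [hone]; ring
      · have hn : v < 0 := by omega
        rw [show pvStep A x (b, qs) i
            = (b, qs ++ [(-(PySem.Int.floordiv (-x) v), true, i)]) by
            rw [pvStep]; rw [← hv]; rw [if_neg h0, if_neg (by omega)]]
        rw [ih b (qs ++ [(-(PySem.Int.floordiv (-x) v), true, i)])]
        simp only [List.map_append, List.sum_append, List.map_cons, List.map_nil,
          List.sum_cons, List.sum_nil]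
        have hone : pvContrib (-(PySem.Int.floordiv (-x) v), true, i)
            (pvSearch A (-(PySem.Int.floordiv (-x) v), true, i) 0 A.length)
            = gA A x (i, v) := by
          rw [pvContrib, pvSearch_eq_bisectLeft]
          simp [gA, h0, hn, show ¬ v > 0 by omega]
        rw [hone]; ring

theorem f_eq (A : List Int) (x : Int) (k : Int) : f A x k = f_alt A x k := by
  show decide (_ ≥ k) = decide (_ ≥ k)
  rw [fold_A]
  set st := (PySem.List.pyRange 1 (A.length : Int) 1).foldl (pvStep A x) ((0 : Int), ([] : List (Int × Bool × Int))) with hst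
  rw [pvBatch_sum A (A.length) 0 A.length st.2 (by omega)]
  have hB := loop_inv A x (PySem.List.pyRange 1 (A.length : Int) 1) 0 []
  rw [← hst] at hB
  simp only [List.map_nil, List.sum_nil, add_zero, zero_add] at hB
  rw [hB]
  congr 2
  -- A's enumerate sum equals B's range sum
  rw [PySem.List.enumerate_eq_map_pyRange (d := 0), List.map_map, PySem.List.len_eq]
  have hcong : ∀ j ∈ PySem.List.pyRange 1 (A.length : Int),
      ((fun p : Int × Int => if p.1 = 0 then 0 else gA A x p)
          ∘ fun j => (j, PySem.List.pyGetD A j 0)) j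
        = gA A x (j, PySem.List.pyGetD A j 0) := by
    intro j hj
    have h1 : (1 : Int) ≤ j := (PySem.List.mem_pyRange_one.mp hj).1
    show (if j = 0 then 0 else gA A x (j, PySem.List.pyGetD A j 0)) = _
    rw [if_neg (by omega)]
  rcases Nat.eq_zero_or_pos A.length with h0 | hpos
  · rw [PySem.List.pyRange_one_eq_nil (by omega : (A.length : Int) ≤ 0),
        PySem.List.pyRange_one_eq_nil (by omega : (A.length : Int) ≤ 1)]
    simp
  · rw [PySem.List.pyRange_one_cons (by exact_mod_cast hpos : (0 : Int) < (A.length : Int))]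
    simp only [zero_add, List.map_cons, List.sum_cons, Function.comp_apply]
    rw [List.map_congr_left hcong]
    simp

-- ===== VERDICT (by name: the statement is the Claim_ definition above) =====
theorem f_spec : Claim_equal_f := by
  intro A x k _
  unfold Spec_f
  exact f_eq A x k
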